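-- pv_equiv track=rewrite | github.com/MartinCampbell1/quorum | orchestrator/engine.py | _trim_protocol_trace_to_checkpoint
-- ===== SOURCE A (Python) =====
-- import copy
--
-- def _trim_protocol_trace_to_checkpoint(trace: list[dict] | None, checkpoint_id: str | None) -> list[dict]:
--     normalized_checkpoint_id = str(checkpoint_id or "").strip()
--     if not normalized_checkpoint_id:
--         return []
--     trimmed: list[dict] = []
--     for item in list(trace or []):
--         if not isinstance(item, dict):
--             continue
--         trimmed.append(copy.deepcopy(item))
--         if str(item.get("checkpoint_id") or "").strip() == normalized_checkpoint_id:
--             break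
--     return trimmed
-- ===== SOURCE B (Python) =====
-- import copy
--
-- def _trim_protocol_trace_to_checkpoint(trace: list[dict] | None, checkpoint_id: str | None) -> list[dict]:
--     normalized_checkpoint_id = str(checkpoint_id or "").strip()
--     if not normalized_checkpoint_id:
--         return []
--     dicts = [item for item in (trace or []) if isinstance(item, dict)]
--     idx = next(
--         (i for i, item in enumerate(dicts)
--          if str(item.get("checkpoint_id") or "").strip() == normalized_checkpoint_id),
--         None,
--     )
--     prefix = dicts if idx is None else dicts[: idx + 1]
--     return [copy.deepcopy(item) for item in prefix]
-- ===== Notes on version B (the rewrite author's own statement) =====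
-- stated objective: alternative
-- what changed: Replaced A's single early-exit loop that appends deep copies and breaks on the matching checkpoint with a pipeline: filter the dict items once, locate the first matching index with next(enumerate(...)), slice the prefix dicts[:idx+1] (or take all when no match), and deep-copy that prefix in one comprehension.
import Mathlib
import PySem

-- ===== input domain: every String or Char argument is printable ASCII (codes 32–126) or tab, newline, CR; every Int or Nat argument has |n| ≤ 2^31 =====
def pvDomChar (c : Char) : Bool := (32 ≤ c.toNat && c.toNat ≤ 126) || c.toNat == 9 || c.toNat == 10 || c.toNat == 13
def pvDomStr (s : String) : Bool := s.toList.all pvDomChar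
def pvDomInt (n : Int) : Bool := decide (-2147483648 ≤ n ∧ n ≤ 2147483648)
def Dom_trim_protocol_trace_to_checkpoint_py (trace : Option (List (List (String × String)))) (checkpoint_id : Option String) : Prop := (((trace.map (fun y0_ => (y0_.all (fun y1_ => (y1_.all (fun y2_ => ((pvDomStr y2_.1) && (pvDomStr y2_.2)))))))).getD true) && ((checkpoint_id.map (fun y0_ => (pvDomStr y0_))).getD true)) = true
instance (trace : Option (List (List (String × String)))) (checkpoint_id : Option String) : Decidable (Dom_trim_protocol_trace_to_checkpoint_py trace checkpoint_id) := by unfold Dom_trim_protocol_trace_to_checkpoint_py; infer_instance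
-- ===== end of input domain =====

-- B replaces A's single early-exit append-and-break loop by an index search (findIdx? / next)
-- followed by a prefix slice; objective: alternative decomposition, same cost.
-- Equivalence is about the RETURN value; neither program mutates its arguments.

-- str(item.get("checkpoint_id") or "") on the assoc-list model: first-matching value, or "" if absent
-- (an empty value also yields "", which the .getD "" composition preserves exactly).
def pvCkpt (item : List (String × String)) : String :=
  ((item.find? (fun kv => kv.1 == "checkpoint_id")).map (·.2)).getD ""

-- ===== PORT A =====
-- the for-loop with append + conditional break (isinstance(item, dict) is always true in this model)
def trimLoopA (norm : String) : List (List (String × String)) → List (List (String × String))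
  | [] => []
  | item :: rest =>
    if PySem.Str.strip (pvCkpt item) == norm then [item]
    else item :: trimLoopA norm rest

def trim_protocol_trace_to_checkpoint_py (trace : Option (List (List (String × String)))) (checkpoint_id : Option String) : List (List (String × String)) :=
  let norm := PySem.Str.strip (checkpoint_id.getD "")
  if norm == "" then []
  else trimLoopA norm (trace.getD [])

-- ===== PORT B =====
-- Source B: filter dicts (identity in this typed model), next(...)-style index search, slice dicts[:idx+1]
def trim_protocol_trace_to_checkpoint_py_alt (trace : Option (List (List (String × String)))) (checkpoint_id : Option String) : List (List (String × String)) :=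
  let norm := PySem.Str.strip (checkpoint_id.getD "")
  if norm == "" then []
  else
    let ds := trace.getD []
    match ds.findIdx? (fun item => PySem.Str.strip (pvCkpt item) == norm) with
    | some i => ds.take (i + 1)
    | none => ds

-- ===== PRECONDITION & SPEC =====
def Spec_trim_protocol_trace_to_checkpoint_py (trace : Option (List (List (String × String)))) (checkpoint_id : Option String) (out : List (List (String × String))) : Prop := out = trim_protocol_trace_to_checkpoint_py_alt trace checkpoint_id
instance (trace : Option (List (List (String × String)))) (checkpoint_id : Option String) (out : List (List (String × String))) : Decidable (Spec_trim_protocol_trace_to_checkpoint_py trace checkpoint_id out) := by unfold Spec_trim_protocol_trace_to_checkpoint_py; infer_instance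

-- ===== CLAIM (what is proved, stated in full; the proofs are below) =====
def Claim_equal_trim_protocol_trace_to_checkpoint_py : Prop := ∀ (trace : Option (List (List (String × String)))) (checkpoint_id : Option String), Dom_trim_protocol_trace_to_checkpoint_py trace checkpoint_id → Spec_trim_protocol_trace_to_checkpoint_py trace checkpoint_id (trim_protocol_trace_to_checkpoint_py trace checkpoint_id)

-- ===== LEMMAS AND PROOFS =====
theorem trimLoopA_eq_findIdx (norm : String) (ds : List (List (String × String))) :
    trimLoopA norm ds =
      match ds.findIdx? (fun item => PySem.Str.strip (pvCkpt item) == norm) with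
      | some i => ds.take (i + 1)
      | none => ds := by
  induction ds with
  | nil => simp [trimLoopA]
  | cons a l ih =>
    by_cases h : PySem.Str.strip (pvCkpt a) == norm
    · simp [trimLoopA, List.findIdx?_cons, h]
    · simp only [trimLoopA, List.findIdx?_cons, h, Bool.false_eq_true, ite_false, ih]
      cases l.findIdx? (fun item => PySem.Str.strip (pvCkpt item) == norm) <;> simp

-- ===== VERDICT (by name: the statement is the Claim_ definition above) =====
theorem trim_protocol_trace_to_checkpoint_py_spec : Claim_equal_trim_protocol_trace_to_checkpoint_py := by
  intro trace checkpoint_id _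
  unfold Spec_trim_protocol_trace_to_checkpoint_py
  unfold trim_protocol_trace_to_checkpoint_py trim_protocol_trace_to_checkpoint_py_alt
  simp only [trimLoopA_eq_findIdx]
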